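-- pv_equiv track=rewrite | github.com/ekoupp02-ucy/reversing-petri-nets-asp | RandomPetriNetsGenerator/analysePetriNets.py | _fix_double_rng_path
-- ===== SOURCE A (Python) =====
-- def _fix_double_rng_path(s: str) -> str:
--     s = str(s)
--     # collapse any repeated ".../RandomPetriNetsGenerator/RandomPetriNetsGenerator/..."
--     while "RandomPetriNetsGenerator/RandomPetriNetsGenerator/" in s:
--         s = s.replace(
--             "RandomPetriNetsGenerator/RandomPetriNetsGenerator/",
--             "RandomPetriNetsGenerator/"
--         )
--     return s
-- ===== SOURCE B (Python) =====
-- SEG = "RandomPetriNetsGenerator/"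
-- _DBL = SEG + SEG
--
-- def _fix_double_rng_path(s: str) -> str:
--     s = str(s)
--     # single left-to-right scan: whenever the doubled segment starts here,
--     # skip one copy and re-check at the same logical position
--     out = []
--     i = 0
--     n = len(s)
--     while i < n:
--         if s.startswith(_DBL, i):
--             i += len(SEG)
--         else:
--             out.append(s[i])
--             i += 1
--     return "".join(out)
-- ===== Notes on version B (the rewrite author's own statement) =====
-- stated objective: alternative
-- what changed: A repeatedly calls str.replace on the whole string until the doubled segment disappears; B makes a single left-to-right index scan that skips one segment copy whenever the doubled segment starts at the current position, collapsing every run of consecutive segments to one in one pass.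
import Mathlib
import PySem

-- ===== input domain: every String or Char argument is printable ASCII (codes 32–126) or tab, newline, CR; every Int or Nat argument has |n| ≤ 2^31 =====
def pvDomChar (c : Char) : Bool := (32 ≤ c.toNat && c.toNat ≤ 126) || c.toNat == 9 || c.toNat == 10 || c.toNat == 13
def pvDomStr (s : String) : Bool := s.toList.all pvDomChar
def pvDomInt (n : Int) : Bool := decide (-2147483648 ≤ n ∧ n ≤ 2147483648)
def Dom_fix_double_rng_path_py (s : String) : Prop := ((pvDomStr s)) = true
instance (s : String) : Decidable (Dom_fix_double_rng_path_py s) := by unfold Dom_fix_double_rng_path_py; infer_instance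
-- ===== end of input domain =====

-- B replaces A's fixpoint-of-global-replace loop by a single left-to-right scan that
-- skips one segment copy whenever the doubled segment starts at the current position
-- (objective: alternative — one pass instead of repeated whole-string replace passes).

-- ===== PORT A =====
-- the path segment, as a character list (shared literal constant)
def segT : List Char := "RandomPetriNetsGenerator/".toList

-- scan model of Python's s.replace(dbl, seg): at each position, if the doubled
-- segment is a prefix, emit one segment and jump over both copies, else copy a char
def rep : List Char → List Char
  | [] => []
  | c :: t =>
    if (segT ++ segT) <+: (c :: t) then segT ++ rep (List.drop 50 (c :: t))
    else c :: rep t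
termination_by s => s.length
decreasing_by
  · simp
  · simp

theorem rep_cons (c : Char) (t : List Char) :
    rep (c :: t) =
      if (segT ++ segT) <+: (c :: t) then segT ++ rep (List.drop 50 (c :: t))
      else c :: rep t := by
  rw [rep]

theorem segT_len : segT.length = 25 := by decide

theorem dbl_toList : ("RandomPetriNetsGenerator/RandomPetriNetsGenerator/".toList) = segT ++ segT := by
  decide

theorem rep_len : ∀ (n : Nat) (s : List Char), s.length ≤ n →
    (rep s).length ≤ s.length ∧ ((segT ++ segT) <:+: s → (rep s).length < s.length) := by
  intro n
  induction n with
  | zero =>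
    intro s hs
    have hnil : s = [] := List.eq_nil_of_length_eq_zero (Nat.le_zero.mp hs)
    subst hnil
    refine ⟨by simp [rep], ?_⟩
    intro h
    have := List.eq_nil_of_infix_nil h
    have h2 : (segT ++ segT).length = 50 := by simp [segT_len]
    simp [this] at h2
  | succ n ih =>
    intro s hs
    match s with
    | [] =>
      refine ⟨by simp [rep], ?_⟩
      intro h
      have := List.eq_nil_of_infix_nil h
      have h2 : (segT ++ segT).length = 50 := by simp [segT_len]
      simp [this] at h2
    | c :: t =>
      rw [rep_cons]
      by_cases hd : (segT ++ segT) <+: (c :: t)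
      · rw [if_pos hd]
        obtain ⟨r, hr⟩ := hd
        have hdl : (segT ++ segT).length = 50 := by simp [segT_len]
        have hdrop : List.drop 50 (c :: t) = r := by
          have h50 : List.drop (segT ++ segT).length ((segT ++ segT) ++ r) = r := List.drop_left
          rw [hr, hdl] at h50; exact h50
        have hlen : (c :: t).length = 50 + r.length := by
          rw [← hr]; simp [segT_len]; omega
        have hrn : r.length ≤ n := by
          have : (c :: t).length ≤ n + 1 := hs
          omega
        obtain ⟨hle, _⟩ := ih r hrn
        rw [hdrop]
        have hout : (segT ++ rep r).length = 25 + (rep r).length := by simp [segT_len]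
        exact ⟨by omega, fun _ => by omega⟩
      · rw [if_neg hd]
        have htn : t.length ≤ n := by
          have : (c :: t).length ≤ n + 1 := hs
          simp at this; omega
        obtain ⟨hle, hlt⟩ := ih t htn
        refine ⟨by simp; omega, ?_⟩
        intro hinf
        rcases List.infix_cons_iff.mp hinf with h1 | h2
        · exact absurd h1 hd
        · have := hlt h2; simp; omega

theorem go_eq_rep : ∀ (fuel : Nat) (l acc : List Char), l.length ≤ fuel →
    PySem.Chars.replace.go ("RandomPetriNetsGenerator/RandomPetriNetsGenerator/".toList)
      ("RandomPetriNetsGenerator/".toList) fuel l acc = acc.reverse ++ rep l := by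
  intro fuel
  induction fuel with
  | zero =>
    intro l acc hl
    have hnil : l = [] := List.eq_nil_of_length_eq_zero (Nat.le_zero.mp hl)
    subst hnil
    rw [PySem.Chars.replace.go]
    simp [rep]
  | succ n ih =>
    intro l acc hl
    match l with
    | [] =>
      rw [PySem.Chars.replace.go]
      · simp [rep]
      · omega
    | c :: t =>
      rw [PySem.Chars.replace.go]
      have hdl : ("RandomPetriNetsGenerator/RandomPetriNetsGenerator/".toList).length = 50 := by decide
      by_cases hd : (segT ++ segT) <+: (c :: t)
      · have hb : ("RandomPetriNetsGenerator/RandomPetriNetsGenerator/".toList).isPrefixOf (c :: t) = true := by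
          rw [List.isPrefixOf_iff_prefix, dbl_toList]; exact hd
        rw [if_pos hb, hdl]
        have hdn : (List.drop 50 (c :: t)).length ≤ n := by
          have hl' : t.length + 1 ≤ n + 1 := by simpa using hl
          simp; omega
        rw [ih _ _ hdn, rep_cons, if_pos hd]
        simp [segT]
      · have hb : ("RandomPetriNetsGenerator/RandomPetriNetsGenerator/".toList).isPrefixOf (c :: t) = false := by
          rw [Bool.eq_false_iff]
          intro hc
          exact hd (by rw [← dbl_toList]; exact List.isPrefixOf_iff_prefix.mp hc)
        rw [hb]
        simp only [Bool.false_eq_true, if_false]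
        have htn : t.length ≤ n := by simp at hl; omega
        rw [ih _ _ htn, rep_cons, if_neg hd]
        simp

theorem replace_eq_rep (l : List Char) :
    PySem.Chars.replace l ("RandomPetriNetsGenerator/RandomPetriNetsGenerator/".toList)
      ("RandomPetriNetsGenerator/".toList) = rep l := by
  rw [PySem.Chars.replace]
  rw [if_neg (by decide)]
  rw [go_eq_rep l.length l [] le_rfl]
  simp

theorem repl_lt (s : String)
    (h : PySem.Str.isIn "RandomPetriNetsGenerator/RandomPetriNetsGenerator/" s = true) :
    (PySem.Str.replace s "RandomPetriNetsGenerator/RandomPetriNetsGenerator/"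
      "RandomPetriNetsGenerator/").toList.length < s.toList.length := by
  rw [PySem.Str.toList_replace, replace_eq_rep]
  have hinf : ("RandomPetriNetsGenerator/RandomPetriNetsGenerator/".toList) <:+: s.toList :=
    (PySem.Str.isIn_iff_infix _ _).mp h
  rw [dbl_toList] at hinf
  exact (rep_len s.toList.length s.toList le_rfl).2 hinf

-- literal transliteration of A: while dbl in s: s = s.replace(dbl, seg)
def fix_double_rng_path_py (s : String) : String :=
  if PySem.Str.isIn "RandomPetriNetsGenerator/RandomPetriNetsGenerator/" s = true then
    fix_double_rng_path_py (PySem.Str.replace s "RandomPetriNetsGenerator/RandomPetriNetsGenerator/"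
      "RandomPetriNetsGenerator/")
  else s
termination_by s.toList.length
decreasing_by exact repl_lt _ (by assumption)

-- ===== PORT B =====
-- B's scan: if the doubled segment starts here, skip one copy (25 chars) and re-check;
-- otherwise copy the current character
def scanB : List Char → List Char
  | [] => []
  | c :: t =>
    if (segT ++ segT) <+: (c :: t) then scanB (List.drop 25 (c :: t))
    else c :: scanB t
termination_by s => s.length
decreasing_by
  · simp
  · simp

def fix_double_rng_path_py_alt (s : String) : String := String.ofList (scanB s.toList)

-- ===== PRECONDITION & SPEC =====
def Spec_fix_double_rng_path_py (s : String) (out : String) : Prop := out = fix_double_rng_path_py_alt s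
instance (s : String) (out : String) : Decidable (Spec_fix_double_rng_path_py s out) := by unfold Spec_fix_double_rng_path_py; infer_instance

-- ===== CLAIM (what is proved, stated in full; the proofs are below) =====
def Claim_equal_fix_double_rng_path_py : Prop := ∀ (s : String), Dom_fix_double_rng_path_py s → Spec_fix_double_rng_path_py s (fix_double_rng_path_py s)

-- ===== LEMMAS AND PROOFS =====

theorem scanB_cons (c : Char) (t : List Char) :
    scanB (c :: t) =
      if (segT ++ segT) <+: (c :: t) then scanB (List.drop 25 (c :: t))
      else c :: scanB t := by
  rw [scanB]

-- segT has no nonempty proper border (no self-overlap)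
theorem no_border : ∀ k, k < 25 → 0 < k → List.take k segT ≠ List.drop (25 - k) segT := by
  decide

theorem suffix_prefix_eq (u : List Char) (hs : u <:+ segT) (hp : u <+: segT) :
    u = [] ∨ u = segT := by
  have hl := hs.length_le
  rw [segT_len] at hl
  rcases Nat.eq_zero_or_pos u.length with h0 | hpos
  · left; exact List.eq_nil_of_length_eq_zero h0
  rcases eq_or_lt_of_le hl with h25 | hlt
  · right; exact hp.eq_of_length (by rw [h25, segT_len])
  · exfalso
    have ht : u = List.take u.length segT := List.prefix_iff_eq_take.mp hp
    have hd : u = List.drop (segT.length - u.length) segT := List.suffix_iff_eq_drop.mp hs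
    rw [segT_len] at hd
    exact no_border u.length hlt hpos (ht.symm.trans hd)

theorem prefix_T_of (u r : List Char) (h : segT <+: u ++ r) (hl : u.length ≤ 25) :
    u <+: segT :=
  List.prefix_of_prefix_length_le (List.prefix_append u r) h (by rw [segT_len]; exact hl)

theorem not_T_prefix (u r : List Char) (hs : u <:+ segT) (hne : u ≠ []) (hnT : u ≠ segT) :
    ¬ segT <+: (u ++ r) := by
  intro h
  have hle : u.length ≤ 25 := by have := hs.length_le; rwa [segT_len] at this
  rcases suffix_prefix_eq u hs (prefix_T_of u r h hle) with h0 | hT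
  exacts [hne h0, hnT hT]

theorem dbl_prefix_iff (x : List Char) : (segT ++ segT) <+: (segT ++ x) ↔ segT <+: x :=
  List.prefix_append_right_inj segT

def tailT : List Char := "andomPetriNetsGenerator/".toList

theorem segT_cons : segT = 'R' :: tailT := by decide

theorem tailT_suffix : tailT <:+ segT := ⟨['R'], by rw [segT_cons]; rfl⟩

theorem tailT_ne : tailT ≠ segT := by decide

theorem tail_suffix (c : Char) (u : List Char) (h : (c :: u) <:+ segT) : u <:+ segT := by
  obtain ⟨t, ht⟩ := h
  exact ⟨t ++ [c], by simpa [List.append_assoc] using ht⟩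

theorem rep_suffix_append : ∀ (u : List Char), u <:+ segT → u ≠ segT →
    ∀ r, rep (u ++ r) = u ++ rep r := by
  intro u
  induction u with
  | nil => intro _ _ r; simp
  | cons c u' ih =>
    intro hs hne r
    have hnd : ¬ (segT ++ segT) <+: ((c :: u') ++ r) := by
      intro h
      exact not_T_prefix (c :: u') r hs (by simp) hne ((List.prefix_append segT segT).trans h)
    have hu's : u' <:+ segT := tail_suffix c u' hs
    have hu'ne : u' ≠ segT := by
      intro he
      have h1 := hs.length_le
      rw [segT_len] at h1
      have h2 := congrArg List.length he
      rw [segT_len] at h2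
      simp at h1 h2
      omega
    rw [List.cons_append, rep_cons, if_neg (by simpa using hnd), ih hu's hu'ne r]
    simp

theorem rep_T_append (r : List Char) (h : ¬ segT <+: r) :
    rep (segT ++ r) = segT ++ rep r := by
  have hnd : ¬ (segT ++ segT) <+: (segT ++ r) := fun hc => h ((dbl_prefix_iff r).mp hc)
  have he1 : segT ++ r = 'R' :: (tailT ++ r) := by rw [segT_cons]; rfl
  rw [he1, rep_cons, if_neg (he1 ▸ hnd), rep_suffix_append tailT tailT_suffix tailT_ne r,
    ← List.cons_append, ← segT_cons]

theorem NP' : ∀ (t u : List Char), u <:+ segT → u ≠ [] → ¬ u <+: t → ¬ u <+: rep t := by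
  intro t
  induction t with
  | nil =>
    intro u _ hne _ hc
    have h0 : rep ([] : List Char) = [] := by rw [rep]
    rw [h0] at hc
    exact hne (List.prefix_nil.mp hc)
  | cons c t' ih =>
    intro u hs hne hnp hrep
    rw [rep_cons] at hrep
    by_cases hd : (segT ++ segT) <+: (c :: t')
    · rw [if_pos hd] at hrep
      have hle : u.length ≤ 25 := by have := hs.length_le; rwa [segT_len] at this
      have hu : u <+: segT :=
        List.prefix_of_prefix_length_le hrep (List.prefix_append segT _)
          (by rw [segT_len]; exact hle)
      rcases suffix_prefix_eq u hs hu with h0 | hT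
      · exact hne h0
      · subst hT; exact hnp ((List.prefix_append segT segT).trans hd)
    · rw [if_neg hd] at hrep
      cases u with
      | nil => exact hne rfl
      | cons u0 u1 =>
        obtain ⟨rfl, h1⟩ := List.cons_prefix_cons.mp hrep
        have h1ne : u1 ≠ [] := by
          rintro rfl
          exact hnp ⟨t', rfl⟩
        exact ih u1 (tail_suffix u0 u1 hs) h1ne
          (fun hc => hnp (List.cons_prefix_cons.mpr ⟨rfl, hc⟩)) h1

theorem NP (t : List Char) (h : ¬ segT <+: t) : ¬ segT <+: rep t :=
  NP' t segT List.suffix_rfl (by decide) h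

theorem rep_T_prefix (r : List Char) (h : segT <+: r) : segT <+: rep r := by
  by_cases hd : (segT ++ segT) <+: r
  · cases r with
    | nil => exact absurd (List.prefix_nil.mp h) (by decide)
    | cons c t => rw [rep_cons, if_pos hd]; exact List.prefix_append _ _
  · obtain ⟨r2, hr2⟩ := h
    have h2 : ¬ segT <+: r2 := fun hc => hd (by rw [← hr2]; exact (dbl_prefix_iff r2).mpr hc)
    rw [← hr2, rep_T_append r2 h2]
    exact List.prefix_append _ _

theorem scanB_suffix_append : ∀ (u : List Char), u <:+ segT → u ≠ segT →
    ∀ r, scanB (u ++ r) = u ++ scanB r := by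
  intro u
  induction u with
  | nil => intro _ _ r; simp
  | cons c u' ih =>
    intro hs hne r
    have hnd : ¬ (segT ++ segT) <+: ((c :: u') ++ r) := by
      intro h
      exact not_T_prefix (c :: u') r hs (by simp) hne ((List.prefix_append segT segT).trans h)
    have hu's : u' <:+ segT := tail_suffix c u' hs
    have hu'ne : u' ≠ segT := by
      intro he
      have h1 := hs.length_le
      rw [segT_len] at h1
      have h2 := congrArg List.length he
      rw [segT_len] at h2
      simp at h1 h2
      omega
    rw [List.cons_append, scanB_cons, if_neg (by simpa using hnd), ih hu's hu'ne r]
    simp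

theorem scanB_T_append (r : List Char) (h : ¬ segT <+: r) :
    scanB (segT ++ r) = segT ++ scanB r := by
  have hnd : ¬ (segT ++ segT) <+: (segT ++ r) := fun hc => h ((dbl_prefix_iff r).mp hc)
  have he1 : segT ++ r = 'R' :: (tailT ++ r) := by rw [segT_cons]; rfl
  rw [he1, scanB_cons, if_neg (he1 ▸ hnd), scanB_suffix_append tailT tailT_suffix tailT_ne r,
    ← List.cons_append, ← segT_cons]

-- scanB skips a leading segment copy when another segment run follows
theorem scanB_seg_skip (x : List Char) (h : segT <+: x) : scanB (segT ++ x) = scanB x := by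
  have hdp : (segT ++ segT) <+: (segT ++ x) := (dbl_prefix_iff x).mpr h
  have hdrop : List.drop 25 (segT ++ x) = x := by
    have := List.drop_left (l₁ := segT) (l₂ := x)
    rwa [segT_len] at this
  have he1 : segT ++ x = 'R' :: (tailT ++ x) := by rw [segT_cons]; rfl
  rw [he1, scanB_cons, if_pos (he1 ▸ hdp), ← he1, hdrop]

theorem rep_dbl (r : List Char) : rep ((segT ++ segT) ++ r) = segT ++ rep r := by
  have hdp : (segT ++ segT) <+: ((segT ++ segT) ++ r) := List.prefix_append _ _
  have hdl : (segT ++ segT).length = 50 := by simp [segT_len]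
  have hdrop : List.drop 50 ((segT ++ segT) ++ r) = r := by
    have := List.drop_left (l₁ := segT ++ segT) (l₂ := r)
    rwa [hdl] at this
  have he1 : (segT ++ segT) ++ r = 'R' :: ((tailT ++ segT) ++ r) := by
    rw [segT_cons]; simp
  rw [he1, rep_cons, if_pos (he1 ▸ hdp), ← he1, hdrop]

theorem scanB_rep_aux : ∀ (n : Nat) (s : List Char), s.length ≤ n → scanB (rep s) = scanB s := by
  intro n
  induction n with
  | zero =>
    intro s hs
    rw [List.eq_nil_of_length_eq_zero (Nat.le_zero.mp hs)]
    have h0 : rep ([] : List Char) = [] := by rw [rep]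
    rw [h0]
  | succ n ih =>
    intro s hs
    by_cases hd : (segT ++ segT) <+: s
    · obtain ⟨r, hr⟩ := hd
      have hlen : s.length = 50 + r.length := by
        rw [← hr]; simp [segT_len]; omega
      have hrn : r.length ≤ n := by omega
      have hrw1 : rep s = segT ++ rep r := by rw [← hr, rep_dbl]
      have hrw2 : scanB s = scanB (segT ++ r) := by
        rw [← hr, List.append_assoc, scanB_seg_skip (segT ++ r) (List.prefix_append _ _)]
      by_cases hTr : segT <+: r
      · rw [hrw1, hrw2, scanB_seg_skip (rep r) (rep_T_prefix r hTr), scanB_seg_skip r hTr]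
        exact ih r hrn
      · rw [hrw1, hrw2, scanB_T_append (rep r) (NP r hTr), scanB_T_append r hTr, ih r hrn]
    · cases s with
      | nil =>
        have h0 : rep ([] : List Char) = [] := by rw [rep]
        rw [h0]
      | cons c t =>
        by_cases hT : segT <+: (c :: t)
        · obtain ⟨r, hr⟩ := hT
          have hTr : ¬ segT <+: r := fun hc => hd (by rw [← hr]; exact (dbl_prefix_iff r).mpr hc)
          have hlen : (c :: t).length = 25 + r.length := by
            rw [← hr]; simp [segT_len]
          have hrn : r.length ≤ n := by
            have : (c :: t).length ≤ n + 1 := hs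
            omega
          rw [← hr, rep_T_append r hTr, scanB_T_append (rep r) (NP r hTr),
            scanB_T_append r hTr, ih r hrn]
        · have hrs : rep (c :: t) = c :: rep t := by rw [rep_cons, if_neg hd]
          have hnd2 : ¬ (segT ++ segT) <+: (c :: rep t) := by
            intro hc
            exact (NP (c :: t) hT) (by rw [hrs]; exact (List.prefix_append segT segT).trans hc)
          have htn : t.length ≤ n := by
            have : (c :: t).length ≤ n + 1 := hs
            simp at this; omega
          rw [hrs, scanB_cons, if_neg hnd2, ih t htn, scanB_cons, if_neg hd]

theorem scanB_rep (s : List Char) : scanB (rep s) = scanB s :=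
  scanB_rep_aux s.length s le_rfl

theorem scanB_id : ∀ (s : List Char), ¬ (segT ++ segT) <:+: s → scanB s = s := by
  intro s
  induction s with
  | nil => intro _; rw [scanB]
  | cons c t ih =>
    intro h
    rw [scanB_cons, if_neg (fun hp => h hp.isInfix),
      ih (fun hi => h (hi.trans (List.suffix_cons c t).isInfix))]

theorem portA_eq (s : String) : fix_double_rng_path_py s = String.ofList (scanB s.toList) := by
  induction s using fix_double_rng_path_py.induct with
  | case1 s h ih =>
    rw [fix_double_rng_path_py, if_pos h, ih]
    congr 1
    rw [PySem.Str.toList_replace, replace_eq_rep]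
    exact scanB_rep s.toList
  | case2 s h =>
    rw [fix_double_rng_path_py, if_neg h]
    have hni : ¬ (segT ++ segT) <:+: s.toList := by
      intro hi
      exact h ((PySem.Str.isIn_iff_infix _ _).mpr (by rw [dbl_toList]; exact hi))
    rw [scanB_id s.toList hni, String.ofList_toList]

-- ===== VERDICT (by name: the statement is the Claim_ definition above) =====
theorem fix_double_rng_path_py_spec : Claim_equal_fix_double_rng_path_py := by
  intro s _
  show _ = fix_double_rng_path_py_alt s
  exact portA_eq s
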